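-- pv_equiv track=rewrite | github.com/pryang0601/Auto-Table-Operation | wide_to_long.py | remove_redundant_patterns
-- ===== SOURCE A (Python) =====
-- def remove_redundant_patterns(patterns):
--     # Sort patterns by count (descending) and then by pattern length (descending)
--     patterns = sorted(patterns, key=lambda x: (-x[1], -len(x[0].split()), x[0]))
--
--     # Use a set to keep track of patterns to be removed
--     to_remove = set()
--
--     # Identify redundant patterns
--     for i, (pattern_i, count_i) in enumerate(patterns):
--         for j, (pattern_j, count_j) in enumerate(patterns):
--             if i != j and pattern_j not in to_remove and pattern_i not in to_remove and count_i == count_j: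
--                 # Check if pattern_j is a subset of pattern_i
--                 if pattern_j in pattern_i:
--                     to_remove.add(pattern_j)
--
--     # Filter out the redundant patterns
--     filtered_patterns = [pattern for pattern in patterns if pattern[0] not in to_remove]
--
--     # Sort patterns by their counts in descending order
--     filtered_patterns = sorted(filtered_patterns, key=lambda x: (x[1], x[0]), reverse = True)
--
--     return filtered_patterns
-- ===== SOURCE B (Python) =====
-- def remove_redundant_patterns(patterns):
--     # A pattern is redundant iff some other pattern with the same count contains
--     # it as a substring; with distinct pattern strings this declarative test
--     # coincides with the original's sequential to_remove bookkeeping, so no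
--     # preliminary sort and no mutable removed-set are needed.
--     keep = [(s, c) for s, c in patterns
--             if not any(s != t and c == d and s in t for t, d in patterns)]
--     return sorted(keep, key=lambda x: (x[1], x[0]), reverse=True)
-- ===== Notes on version B (the rewrite author's own statement) =====
-- stated objective: simpler
-- what changed: B drops the preliminary triple-key sort and the order-dependent mutable to_remove set entirely: a pattern is kept iff no other same-count pattern contains it (one declarative any() per entry), then the kept entries are sorted once by (count, pattern) descending. Pre_ excludes lists where a pattern string recurs and a count also recurs, on which A's global string-keyed to_remove and scan order make the survivor set accidental.
-- outside the precondition, e.g. on remove_redundant_patterns([('a b', 1), ('a b', 1), ('b', 1)]): A returns [('b', 1)], B returns [('a b', 1), ('a b', 1)]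
import Mathlib
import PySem

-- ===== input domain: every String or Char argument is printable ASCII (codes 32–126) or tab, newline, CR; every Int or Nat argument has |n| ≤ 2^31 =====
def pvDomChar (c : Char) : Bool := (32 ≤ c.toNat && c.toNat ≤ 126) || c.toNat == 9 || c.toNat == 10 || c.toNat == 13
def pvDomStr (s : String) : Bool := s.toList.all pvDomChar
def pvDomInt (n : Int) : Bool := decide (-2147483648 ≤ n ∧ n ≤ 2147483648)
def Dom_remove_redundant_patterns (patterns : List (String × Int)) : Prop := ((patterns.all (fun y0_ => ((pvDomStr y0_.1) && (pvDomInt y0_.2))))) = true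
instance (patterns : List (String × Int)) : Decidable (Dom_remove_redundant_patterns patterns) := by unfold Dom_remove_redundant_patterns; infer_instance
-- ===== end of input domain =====

-- B drops A's preliminary triple-key sort and its order-dependent mutable to_remove set:
-- a pattern is kept iff no other same-count pattern contains it (one declarative test per
-- entry), then the kept entries are sorted once; objective: simpler.

-- ===== PORT A =====
-- sorted(xs, key=lambda x: (k1(x), k2(x), k3(x))) — Python's stable sort with a 3-tuple
-- key (lexicographic comparison), in the insertion-sort shape of PySem.List.sorted
def pvBefore3 (k1 k2 : String × Int → Int) (k3 : String × Int → String) (a b : String × Int) : Bool :=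
  decide (k1 a < k1 b) || (!decide (k1 b < k1 a) &&
    (decide (k2 a < k2 b) || (!decide (k2 b < k2 a) && decide (k3 a < k3 b))))

def pvSorted3 (xs : List (String × Int)) (k1 k2 : String × Int → Int) (k3 : String × Int → String) : List (String × Int) :=
  xs.foldl (fun acc x => PySem.List.insertBy (pvBefore3 k1 k2 k3) x acc) []

-- inner-loop body of A: guard 'i != j and pattern_j not in to_remove and pattern_i not in
-- to_remove and count_i == count_j', then 'if pattern_j in pattern_i: to_remove.add(pattern_j)'
def pvInnerA (ip : Int × (String × Int)) (tr : PySem.Set String) (jq : Int × (String × Int)) : PySem.Set String :=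
  if ip.1 ≠ jq.1 ∧ PySem.Set.contains tr jq.2.1 = false ∧ PySem.Set.contains tr ip.2.1 = false ∧ ip.2.2 = jq.2.2 then
    (if PySem.Str.isIn jq.2.1 ip.2.1 then PySem.Set.add tr jq.2.1 else tr)
  else tr

def remove_redundant_patterns (patterns : List (String × Int)) : List (String × Int) :=
  let ps := pvSorted3 patterns (fun x => -x.2) (fun x => -((PySem.Str.split₀ x.1).length : Int)) (fun x => x.1)
  let toRemove : PySem.Set String :=
    (PySem.List.enumerate ps).foldl (fun tr ip =>
      (PySem.List.enumerate ps).foldl (pvInnerA ip) tr) PySem.Set.empty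
  let filtered := ps.filter (fun p => !(PySem.Set.contains toRemove p.1))
  PySem.List.sorted2 filtered (fun x => x.2) (fun x => x.1) true

-- ===== PORT B =====
-- 'any(s != t and c == d and s in t for t, d in patterns)' of Source B
def pvContained (patterns : List (String × Int)) (p : String × Int) : Bool :=
  patterns.any (fun q => decide (p.1 ≠ q.1) && decide (p.2 = q.2) && PySem.Str.isIn p.1 q.1)

def remove_redundant_patterns_alt (patterns : List (String × Int)) : List (String × Int) :=
  let keep := patterns.filter (fun p => !(pvContained patterns p))
  PySem.List.sorted2 keep (fun x => x.2) (fun x => x.1) true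

-- ===== PRECONDITION & SPEC =====
-- Pre_ excludes lists in which some pattern string recurs AND some count also recurs: there
-- A's survivor set depends accidentally on its scan order through the one global string-keyed
-- to_remove set (a duplicate can knock out its own copy mid-scan and shield later substrings,
-- and a removal in one count group silently disables the same string's scan in another group).
def Pre_remove_redundant_patterns (patterns : List (String × Int)) : Prop :=
  (patterns.map Prod.fst).Nodup ∨ (patterns.map Prod.snd).Nodup
instance (patterns : List (String × Int)) : Decidable (Pre_remove_redundant_patterns patterns) := by
  unfold Pre_remove_redundant_patterns; infer_instance

def pvWitness_remove_redundant_patterns : (List (String × Int)) := [("a", 1), ("a b", 1)]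

def Spec_remove_redundant_patterns (patterns : List (String × Int)) (out : List (String × Int)) : Prop := out = remove_redundant_patterns_alt patterns
instance (patterns : List (String × Int)) (out : List (String × Int)) : Decidable (Spec_remove_redundant_patterns patterns out) := by unfold Spec_remove_redundant_patterns; infer_instance

-- ===== CLAIM (what is proved, stated in full; the proofs are below) =====
def Claim_equal_remove_redundant_patterns : Prop := ∀ (patterns : List (String × Int)), Dom_remove_redundant_patterns patterns → Pre_remove_redundant_patterns patterns → Spec_remove_redundant_patterns patterns (remove_redundant_patterns patterns)

-- ===== LEMMAS AND PROOFS =====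

-- The reverse-lex comparator of the FINAL sort (sorted2 … reverse=true inserts x before y iff lt y x)
def pvLt2 (a b : String × Int) : Bool :=
  decide (a.2 < b.2) || (!decide (b.2 < a.2) && decide (a.1 < b.1))

theorem pv_lt2_trans (a b c : String × Int) (h1 : pvLt2 a b = true) (h2 : pvLt2 b c = true) : pvLt2 a c = true := by
  unfold pvLt2 at *
  simp only [Bool.or_eq_true, Bool.and_eq_true, Bool.not_eq_true', decide_eq_true_eq,
    decide_eq_false_iff_not] at h1 h2 ⊢
  rcases h1 with h1 | ⟨h1, h1'⟩ <;> rcases h2 with h2 | ⟨h2, h2'⟩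
  · exact Or.inl (by omega)
  · exact Or.inl (by omega)
  · exact Or.inl (by omega)
  · exact Or.inr ⟨by omega, lt_trans h1' h2'⟩

theorem pv_lt2_asym (a b : String × Int) (h : pvLt2 a b = true) : pvLt2 b a = false := by
  unfold pvLt2 at *
  simp only [Bool.or_eq_true, Bool.and_eq_true, Bool.not_eq_true', decide_eq_true_eq,
    decide_eq_false_iff_not] at h
  rcases h with h | ⟨h, h'⟩
  · simp [lt_asymm h, h]
  · simp [h, lt_asymm h']

theorem pv_lt2_antisymm (a b : String × Int) (h1 : pvLt2 a b = false) (h2 : pvLt2 b a = false) : a = b := by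
  unfold pvLt2 at h1 h2
  simp only [Bool.or_eq_false_iff, Bool.and_eq_false_iff, Bool.not_eq_false',
    decide_eq_true_eq, decide_eq_false_iff_not] at h1 h2
  have hsnd : a.2 = b.2 := le_antisymm (le_of_not_gt h2.1) (le_of_not_gt h1.1)
  have hfst : a.1 = b.1 := by
    rcases h1.2 with h | h
    · exact absurd h h2.1
    · rcases h2.2 with h' | h'
      · exact absurd h' h1.1
      · exact le_antisymm (le_of_not_gt h') (le_of_not_gt h)
  exact Prod.ext hfst hsnd

-- insertion keeps membership and is a permutation of cons
theorem pv_insertBy_perm {α : Type} (b : α → α → Bool) (x : α) (ys : List α) :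
    (PySem.List.insertBy b x ys).Perm (x :: ys) := by
  induction ys with
  | nil => simp [PySem.List.insertBy]
  | cons y ys ih =>
      show (if b x y = true then x :: y :: ys else y :: PySem.List.insertBy b x ys).Perm _
      split_ifs
      · exact List.Perm.refl _
      · exact (ih.cons y).trans (List.Perm.swap x y ys)

theorem pv_foldl_insertBy_perm {α : Type} (b : α → α → Bool) :
    ∀ (xs acc : List α), (xs.foldl (fun a x => PySem.List.insertBy b x a) acc).Perm (acc ++ xs) := by
  intro xs
  induction xs with
  | nil => intro acc; simp
  | cons x xs ih =>
      intro acc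
      simp only [List.foldl_cons]
      refine (ih _).trans ?_
      refine (List.Perm.append_right xs ((pv_insertBy_perm b x acc))).trans ?_
      simpa using (List.perm_middle (a := x) (l₁ := acc) (l₂ := xs)).symm

theorem pv_sorted3_perm (xs : List (String × Int)) (k1 k2 : String × Int → Int) (k3 : String × Int → String) :
    (pvSorted3 xs k1 k2 k3).Perm xs := by
  simpa using pv_foldl_insertBy_perm (pvBefore3 k1 k2 k3) xs []

-- insertion sort with an asymmetric transitive comparator yields Pairwise (no later strictly before an earlier)
theorem pv_insertBy_pairwise {α : Type} (b : α → α → Bool)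
    (htrans : ∀ x y z, b x y = true → b y z = true → b x z = true)
    (hasym : ∀ x y, b x y = true → b y x = false)
    (x : α) : ∀ (ys : List α), ys.Pairwise (fun u v => b v u = false) →
      (PySem.List.insertBy b x ys).Pairwise (fun u v => b v u = false) := by
  intro ys
  induction ys with
  | nil => intro _; simp [PySem.List.insertBy]
  | cons y ys ih =>
      intro hpw
      have hpw' := List.pairwise_cons.mp hpw
      show (if b x y = true then x :: y :: ys else y :: PySem.List.insertBy b x ys).Pairwise _
      split_ifs with hb
      · refine List.pairwise_cons.mpr ⟨?_, hpw⟩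
        intro z hz
        rcases List.mem_cons.mp hz with rfl | hz'
        · exact hasym x z hb
        · by_cases hzx : b z x = true
          · have := htrans z x y hzx hb
            rw [hpw'.1 z hz'] at this
            exact absurd this (by simp)
          · exact Bool.eq_false_iff.mpr hzx
      · refine List.pairwise_cons.mpr ⟨?_, ih hpw'.2⟩
        intro z hz
        rcases (PySem.List.mem_insertBy b x z ys).mp hz with rfl | hz'
        · exact Bool.eq_false_iff.mpr hb
        · exact hpw'.1 z hz'

theorem pv_foldl_insertBy_pairwise {α : Type} (b : α → α → Bool)
    (htrans : ∀ x y z, b x y = true → b y z = true → b x z = true)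
    (hasym : ∀ x y, b x y = true → b y x = false) :
    ∀ (xs acc : List α), acc.Pairwise (fun u v => b v u = false) →
      (xs.foldl (fun a x => PySem.List.insertBy b x a) acc).Pairwise (fun u v => b v u = false) := by
  intro xs
  induction xs with
  | nil => intro acc h; exact h
  | cons x xs ih =>
      intro acc h
      exact ih _ (pv_insertBy_pairwise b htrans hasym x acc h)

-- the final reverse sort is Pairwise in pvLt2's reflexive closure
theorem pv_sorted2_rev_pairwise (xs : List (String × Int)) :
    (PySem.List.sorted2 xs (fun x => x.2) (fun x => x.1) true).Pairwise (fun u v => pvLt2 u v = false) := by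
  have hdef : PySem.List.sorted2 xs (fun x => x.2) (fun x => x.1) true
      = xs.foldl (fun acc x => PySem.List.insertBy (fun a b => pvLt2 b a) x acc) [] := rfl
  rw [hdef]
  have h := pv_foldl_insertBy_pairwise (fun a b => pvLt2 b a)
    (fun x y z hx hy => pv_lt2_trans z y x hy hx)
    (fun x y hx => pv_lt2_asym y x hx) xs [] List.Pairwise.nil
  simpa using h

-- entries of the enumeration
theorem pv_snd_mem_of_mem_enum (ps : List (String × Int)) (ip : Int × (String × Int))
    (h : ip ∈ PySem.List.enumerate ps) : ip.2 ∈ ps := by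
  have := PySem.List.map_snd_enumerate ps 0
  rw [← this]
  exact List.mem_map_of_mem h

theorem pv_enum_index_inj (ps : List (String × Int)) (i : Int) (p q : String × Int)
    (hp : (i, p) ∈ PySem.List.enumerate ps) (hq : (i, q) ∈ PySem.List.enumerate ps) : p = q := by
  rw [PySem.List.mem_enumerate_iff] at hp hq
  obtain ⟨k, hk, hkp⟩ := hp
  obtain ⟨l, hl, hlq⟩ := hq
  obtain ⟨hik, hpk⟩ := Prod.mk.injEq .. ▸ hkp
  obtain ⟨hil, hql⟩ := Prod.mk.injEq .. ▸ hlq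
  have hkl : k = l := by omega
  subst hkl
  exact hpk.trans hql.symm

theorem pv_enum_fst_ne (ps : List (String × Int)) (hnd : (ps.map Prod.fst).Nodup)
    (ip jq : Int × (String × Int)) (hip : ip ∈ PySem.List.enumerate ps)
    (hjq : jq ∈ PySem.List.enumerate ps) (hne : ip.1 ≠ jq.1) : ip.2.1 ≠ jq.2.1 := by
  rw [PySem.List.mem_enumerate_iff] at hip hjq
  obtain ⟨k, hk, hkp⟩ := hip
  obtain ⟨l, hl, hlq⟩ := hjq
  intro heq
  apply hne
  rw [hkp, hlq]
  rw [hkp, hlq] at heq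
  simp only at heq ⊢
  have hk' : k < (ps.map Prod.fst).length := by simpa using hk
  have hl' : l < (ps.map Prod.fst).length := by simpa using hl
  have : (ps.map Prod.fst)[k] = (ps.map Prod.fst)[l] := by
    simpa using heq
  have := (List.Nodup.getElem_inj_iff hnd).mp this
  omega

theorem pv_mem_enum_of_mem (ps : List (String × Int)) (p : String × Int) (h : p ∈ ps) :
    ∃ i, (i, p) ∈ PySem.List.enumerate ps := by
  obtain ⟨k, hk, rfl⟩ := List.mem_iff_getElem.mp h
  exact ⟨(k : Int), (PySem.List.mem_enumerate_iff ps 0 _).mpr ⟨k, hk, by simp⟩⟩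

-- entries with equal strings are equal (strings are distinct)
theorem pv_fst_inj (ps : List (String × Int)) (hnd : (ps.map Prod.fst).Nodup)
    (p q : String × Int) (hp : p ∈ ps) (hq : q ∈ ps) (h : p.1 = q.1) : p = q := by
  obtain ⟨k, hk, rfl⟩ := List.mem_iff_getElem.mp hp
  obtain ⟨l, hl, rfl⟩ := List.mem_iff_getElem.mp hq
  have hk' : k < (ps.map Prod.fst).length := by simpa using hk
  have hl' : l < (ps.map Prod.fst).length := by simpa using hl
  have : (ps.map Prod.fst)[k] = (ps.map Prod.fst)[l] := by simpa using h
  have := (List.Nodup.getElem_inj_iff hnd).mp this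
  subst this
  rfl

-- with pairwise-distinct counts the enumeration carries pairwise-distinct counts too
theorem pv_enum_snd_ne (ps : List (String × Int)) (hnd : (ps.map Prod.snd).Nodup)
    (ip jq : Int × (String × Int)) (hip : ip ∈ PySem.List.enumerate ps)
    (hjq : jq ∈ PySem.List.enumerate ps) (hne : ip.1 ≠ jq.1) : ip.2.2 ≠ jq.2.2 := by
  rw [PySem.List.mem_enumerate_iff] at hip hjq
  obtain ⟨k, hk, hkp⟩ := hip
  obtain ⟨l, hl, hlq⟩ := hjq
  intro heq
  apply hne
  rw [hkp, hlq]
  rw [hkp, hlq] at heq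
  simp only at heq ⊢
  have hk' : k < (ps.map Prod.snd).length := by simpa using hk
  have hl' : l < (ps.map Prod.snd).length := by simpa using hl
  have : (ps.map Prod.snd)[k] = (ps.map Prod.snd)[l] := by simpa using heq
  have := (List.Nodup.getElem_inj_iff hnd).mp this
  omega

theorem pv_snd_inj (ps : List (String × Int)) (hnd : (ps.map Prod.snd).Nodup)
    (p q : String × Int) (hp : p ∈ ps) (hq : q ∈ ps) (h : p.2 = q.2) : p = q := by
  obtain ⟨k, hk, rfl⟩ := List.mem_iff_getElem.mp hp
  obtain ⟨l, hl, rfl⟩ := List.mem_iff_getElem.mp hq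
  have hk' : k < (ps.map Prod.snd).length := by simpa using hk
  have hl' : l < (ps.map Prod.snd).length := by simpa using hl
  have : (ps.map Prod.snd)[k] = (ps.map Prod.snd)[l] := by simpa using h
  have := (List.Nodup.getElem_inj_iff hnd).mp this
  subst this
  rfl

-- with pairwise-distinct counts A's double loop never fires and its set stays empty
theorem pv_innerA_id (ps : List (String × Int)) (hnd : (ps.map Prod.snd).Nodup)
    (ip jq : Int × (String × Int)) (hip : ip ∈ PySem.List.enumerate ps)
    (hjq : jq ∈ PySem.List.enumerate ps) (tr : PySem.Set String) : pvInnerA ip tr jq = tr := by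
  unfold pvInnerA
  rw [if_neg]
  rintro ⟨h1, -, -, h4⟩
  exact pv_enum_snd_ne ps hnd ip jq hip hjq h1 h4

theorem pv_foldl_innerA_id (ps : List (String × Int)) (hnd : (ps.map Prod.snd).Nodup)
    (ip : Int × (String × Int)) (hip : ip ∈ PySem.List.enumerate ps) :
    ∀ (L : List (Int × (String × Int))), (∀ x ∈ L, x ∈ PySem.List.enumerate ps) →
      ∀ (tr : PySem.Set String), L.foldl (pvInnerA ip) tr = tr := by
  intro L
  induction L with
  | nil => intro _ tr; rfl
  | cons x xs ih =>
      intro hL tr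
      rw [List.foldl_cons, pv_innerA_id ps hnd ip x hip (hL x List.mem_cons_self)]
      exact ih (fun y hy => hL y (List.mem_cons_of_mem _ hy)) tr

theorem pv_foldl_outer_id (ps : List (String × Int)) (hnd : (ps.map Prod.snd).Nodup) :
    ∀ (L : List (Int × (String × Int))), (∀ x ∈ L, x ∈ PySem.List.enumerate ps) →
      ∀ (tr : PySem.Set String),
        L.foldl (fun tr ip => (PySem.List.enumerate ps).foldl (pvInnerA ip) tr) tr = tr := by
  intro L
  induction L with
  | nil => intro _ tr; rfl
  | cons x xs ih =>
      intro hL tr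
      rw [List.foldl_cons,
        pv_foldl_innerA_id ps hnd x (hL x List.mem_cons_self) (PySem.List.enumerate ps) (fun y hy => hy)]
      exact ih (fun y hy => hL y (List.mem_cons_of_mem _ hy)) tr

-- pvInnerA only ever adds
theorem pv_mem_innerA_of_mem (ip jq : Int × (String × Int)) (tr : PySem.Set String) (s : String)
    (h : s ∈ tr) : s ∈ pvInnerA ip tr jq := by
  unfold pvInnerA
  split_ifs <;> first | exact h | exact (PySem.Set.mem_add tr jq.2.1 s).mpr (Or.inl h)

theorem pv_mem_of_mem_innerA (ip jq : Int × (String × Int)) (tr : PySem.Set String) (s : String)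
    (h : s ∈ pvInnerA ip tr jq) :
    s ∈ tr ∨ (s = jq.2.1 ∧ ip.1 ≠ jq.1 ∧ ip.2.2 = jq.2.2 ∧ PySem.Str.isIn jq.2.1 ip.2.1 = true) := by
  unfold pvInnerA at h
  split_ifs at h with h1 h2
  · rcases (PySem.Set.mem_add tr jq.2.1 s).mp h with h' | h'
    · exact Or.inl h'
    · exact Or.inr ⟨h', h1.1, h1.2.2.2, h2⟩
  · exact Or.inl h
  · exact Or.inl h

theorem pv_mem_foldl_of_step_mono {β : Type} (f : PySem.Set String → β → PySem.Set String)
    (hf : ∀ tr x s, s ∈ tr → s ∈ f tr x) :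
    ∀ (L : List β) (tr : PySem.Set String) (s : String), s ∈ tr → s ∈ L.foldl f tr := by
  intro L
  induction L with
  | nil => intro tr s h; exact h
  | cons x xs ih =>
      intro tr s h
      exact ih _ s (hf tr x s h)

-- the outer-loop step of A, named so the fold over it can be split without
-- touching the enumeration inside (definitionally the lambda in the port)
def pvOuterF (ps : List (String × Int)) (tr : PySem.Set String) (ip : Int × (String × Int)) : PySem.Set String :=
  (PySem.List.enumerate ps).foldl (pvInnerA ip) tr

theorem pv_outerF_mono (ps : List (String × Int)) (tr : PySem.Set String)
    (ip : Int × (String × Int)) (s : String) (h : s ∈ tr) : s ∈ pvOuterF ps tr ip :=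
  pv_mem_foldl_of_step_mono (pvInnerA ip) (fun tr x s h => pv_mem_innerA_of_mem ip x tr s h)
    (PySem.List.enumerate ps) tr s h

-- every member of the to_remove set is the string of a redundant entry
def pvGood (ps : List (String × Int)) (tr : PySem.Set String) : Prop :=
  ∀ s ∈ tr, ∃ p ∈ ps, p.1 = s ∧ pvContained ps p = true

theorem pv_innerA_good (ps : List (String × Int)) (hnd : (ps.map Prod.fst).Nodup)
    (ip jq : Int × (String × Int)) (hip : ip ∈ PySem.List.enumerate ps)
    (hjq : jq ∈ PySem.List.enumerate ps) (tr : PySem.Set String) (htr : pvGood ps tr) :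
    pvGood ps (pvInnerA ip tr jq) := by
  intro s hs
  rcases pv_mem_of_mem_innerA ip jq tr s hs with h | ⟨rfl, hne, hcnt, hin⟩
  · exact htr s h
  · refine ⟨jq.2, pv_snd_mem_of_mem_enum ps jq hjq, rfl, ?_⟩
    rw [pvContained, List.any_eq_true]
    refine ⟨ip.2, pv_snd_mem_of_mem_enum ps ip hip, ?_⟩
    have hne' : jq.2.1 ≠ ip.2.1 := Ne.symm (pv_enum_fst_ne ps hnd ip jq hip hjq hne)
    simp only [Bool.and_eq_true, decide_eq_true_eq]
    exact ⟨⟨hne', hcnt.symm⟩, hin⟩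

theorem pv_foldl_innerA_good (ps : List (String × Int)) (hnd : (ps.map Prod.fst).Nodup)
    (ip : Int × (String × Int)) (hip : ip ∈ PySem.List.enumerate ps) :
    ∀ (L : List (Int × (String × Int))), (∀ x ∈ L, x ∈ PySem.List.enumerate ps) →
      ∀ (tr : PySem.Set String), pvGood ps tr → pvGood ps (L.foldl (pvInnerA ip) tr) := by
  intro L
  induction L with
  | nil => intro _ tr h; exact h
  | cons x xs ih =>
      intro hL tr h
      exact ih (fun y hy => hL y (List.mem_cons_of_mem _ hy)) _
        (pv_innerA_good ps hnd ip x hip (hL x List.mem_cons_self) tr h)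

theorem pv_foldl_outer_good (ps : List (String × Int)) (hnd : (ps.map Prod.fst).Nodup) :
    ∀ (L : List (Int × (String × Int))), (∀ x ∈ L, x ∈ PySem.List.enumerate ps) →
      ∀ (tr : PySem.Set String), pvGood ps tr →
        pvGood ps (L.foldl (fun tr ip => (PySem.List.enumerate ps).foldl (pvInnerA ip) tr) tr) := by
  intro L
  induction L with
  | nil => intro _ tr h; exact h
  | cons x xs ih =>
      intro hL tr h
      exact ih (fun y hy => hL y (List.mem_cons_of_mem _ hy)) _
        (pv_foldl_innerA_good ps hnd x (hL x List.mem_cons_self)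
          (PySem.List.enumerate ps) (fun y hy => hy) tr h)

-- completeness: every declaratively redundant entry's string lands in A's to_remove set
theorem pv_complete (ps : List (String × Int)) (hnd : (ps.map Prod.fst).Nodup)
    (p : String × Int) (hp : p ∈ ps) (hred : pvContained ps p = true) :
    p.1 ∈ (PySem.List.enumerate ps).foldl (fun tr ip =>
      (PySem.List.enumerate ps).foldl (pvInnerA ip) tr) PySem.Set.empty := by
  -- a same-count container of p.1 of maximal length is itself non-redundant
  set C := ps.filter (fun r => decide (p.1 ≠ r.1) && decide (p.2 = r.2) && PySem.Str.isIn p.1 r.1) with hC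
  have hCne : C ≠ [] := by
    obtain ⟨q, hq, hqpred⟩ := List.any_eq_true.mp hred
    intro hnil
    have : q ∈ C := List.mem_filter.mpr ⟨hq, hqpred⟩
    rw [hnil] at this
    exact absurd this (List.not_mem_nil)
  obtain ⟨w, hw⟩ : ∃ w, w ∈ List.argmax (fun r : String × Int => r.1.toList.length) C := by
    cases hargc : List.argmax (fun r : String × Int => r.1.toList.length) C with
    | none => exact absurd (List.argmax_eq_none.mp hargc) hCne
    | some w => exact ⟨w, rfl⟩
  have hwC : w ∈ C := List.argmax_mem hw
  obtain ⟨hwps, hwpred⟩ := List.mem_filter.mp hwC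
  simp only [Bool.and_eq_true, decide_eq_true_eq] at hwpred
  obtain ⟨⟨hpw1, hpw2⟩, hpw3⟩ := hwpred
  have hwnr : pvContained ps w = false := by
    rw [Bool.eq_false_iff]
    intro hcon
    obtain ⟨r, hr, hrpred⟩ := List.any_eq_true.mp hcon
    simp only [Bool.and_eq_true, decide_eq_true_eq] at hrpred
    obtain ⟨⟨hwr1, hwr2⟩, hwr3⟩ := hrpred
    have hpr1 : p.1 ≠ r.1 := by
      intro hpr
      have h1 : p.1.toList <:+: w.1.toList := (PySem.Str.isIn_iff_infix _ _).mp hpw3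
      have h2 : w.1.toList <:+: p.1.toList := by
        rw [hpr]
        exact (PySem.Str.isIn_iff_infix _ _).mp hwr3
      exact hpw1 (String.toList_inj.mp (List.infix_antisymm h1 h2))
    have hrC : r ∈ C := by
      refine List.mem_filter.mpr ⟨hr, ?_⟩
      simp only [Bool.and_eq_true, decide_eq_true_eq]
      refine ⟨⟨hpr1, hpw2.trans hwr2⟩, ?_⟩
      rw [PySem.Str.isIn_iff_infix]
      exact ((PySem.Str.isIn_iff_infix _ _).mp hpw3).trans ((PySem.Str.isIn_iff_infix _ _).mp hwr3)
    have hle : r.1.toList.length ≤ w.1.toList.length :=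
      List.le_of_mem_argmax (f := fun r : String × Int => r.1.toList.length) hrC hw
    have hinf : w.1.toList <:+: r.1.toList := (PySem.Str.isIn_iff_infix _ _).mp hwr3
    have : w.1.toList = r.1.toList := hinf.sublist.eq_of_length (le_antisymm hinf.length_le hle)
    exact hwr1 (String.toList_inj.mp this)
  -- indices of w and p in the enumeration
  obtain ⟨iw, hiw⟩ := pv_mem_enum_of_mem ps w hwps
  obtain ⟨jp, hjp⟩ := pv_mem_enum_of_mem ps p hp
  have hine : iw ≠ jp := by
    intro h
    subst h
    exact hpw1 (congrArg Prod.fst (pv_enum_index_inj ps iw w p hiw hjp)).symm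
  -- split the outer fold at (iw, w)
  show p.1 ∈ (PySem.List.enumerate ps).foldl (pvOuterF ps) PySem.Set.empty
  obtain ⟨E1, E2, hE⟩ := List.append_of_mem hiw
  rw [hE, List.foldl_append, List.foldl_cons]
  have hE1sub : ∀ x ∈ E1, x ∈ PySem.List.enumerate ps := by
    intro x hx; rw [hE]; exact List.mem_append.mpr (Or.inl hx)
  set tr1 := E1.foldl (pvOuterF ps) PySem.Set.empty with htr1def
  have htr1 : pvGood ps tr1 :=
    pv_foldl_outer_good ps hnd E1 hE1sub PySem.Set.empty
      (by intro s hs; exact absurd hs (List.not_mem_nil))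
  apply pv_mem_foldl_of_step_mono (pvOuterF ps) (fun tr x s h => pv_outerF_mono ps tr x s h)
  -- split the inner fold at (jp, p)
  show p.1 ∈ (PySem.List.enumerate ps).foldl (pvInnerA (iw, w)) tr1
  obtain ⟨D1, D2, hD⟩ := List.append_of_mem hjp
  rw [hD, List.foldl_append, List.foldl_cons]
  have hD1sub : ∀ x ∈ D1, x ∈ PySem.List.enumerate ps := by
    intro x hx; rw [hD]; exact List.mem_append.mpr (Or.inl hx)
  have htr2 : pvGood ps (D1.foldl (pvInnerA (iw, w)) tr1) :=
    pv_foldl_innerA_good ps hnd (iw, w) hiw D1 hD1sub tr1 htr1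
  set tr2 := D1.foldl (pvInnerA (iw, w)) tr1 with htr2def
  apply pv_mem_foldl_of_step_mono (pvInnerA (iw, w))
    (fun tr x s h => pv_mem_innerA_of_mem (iw, w) x tr s h)
  by_cases hmem : p.1 ∈ tr2
  · exact pv_mem_innerA_of_mem _ _ _ _ hmem
  · have hcp : PySem.Set.contains tr2 p.1 = false := by
      rw [Bool.eq_false_iff]
      intro h
      exact hmem ((PySem.Set.contains_iff tr2 p.1).mp h)
    have hcw : PySem.Set.contains tr2 w.1 = false := by
      rw [Bool.eq_false_iff]
      intro h
      obtain ⟨pw, hpwps, hpwfst, hpwcont⟩ := htr2 w.1 ((PySem.Set.contains_iff tr2 w.1).mp h)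
      have : pw = w := pv_fst_inj ps hnd pw w hpwps hwps hpwfst
      rw [this] at hpwcont
      rw [hpwcont] at hwnr
      exact absurd hwnr (by simp)
    show p.1 ∈ pvInnerA (iw, w) tr2 (jp, p)
    unfold pvInnerA
    rw [if_pos ⟨hine, hcp, hcw, hpw2.symm⟩, if_pos hpw3]
    exact (PySem.Set.mem_add tr2 p.1 p.1).mpr (Or.inr rfl)

-- characterization of A's to_remove set: exactly the declaratively redundant strings
theorem pv_char (ps : List (String × Int)) (hnd : (ps.map Prod.fst).Nodup)
    (p : String × Int) (hp : p ∈ ps) :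
    PySem.Set.contains ((PySem.List.enumerate ps).foldl (fun tr ip =>
      (PySem.List.enumerate ps).foldl (pvInnerA ip) tr) PySem.Set.empty) p.1 = pvContained ps p := by
  by_cases hc : pvContained ps p = true
  · rw [hc, PySem.Set.contains_iff]
    exact pv_complete ps hnd p hp hc
  · have hc' : pvContained ps p = false := Bool.eq_false_iff.mpr hc
    rw [hc', Bool.eq_false_iff]
    intro h
    have hgood : pvGood ps ((PySem.List.enumerate ps).foldl (fun tr ip =>
        (PySem.List.enumerate ps).foldl (pvInnerA ip) tr) PySem.Set.empty) :=
      pv_foldl_outer_good ps hnd (PySem.List.enumerate ps) (fun x hx => hx) PySem.Set.empty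
        (by intro s hs; exact absurd hs (List.not_mem_nil))
    obtain ⟨pw, hpwps, hpwfst, hpwcont⟩ := hgood p.1 ((PySem.Set.contains_iff _ _).mp h)
    have heq : pw = p := pv_fst_inj ps hnd pw p hpwps hp hpwfst
    rw [heq] at hpwcont
    rw [hc'] at hpwcont
    exact absurd hpwcont (by simp)

-- ===== VERDICT (by name: the statement is the Claim_ definition above) =====
theorem remove_redundant_patterns_spec : Claim_equal_remove_redundant_patterns := by
  intro patterns _ hpre
  unfold Spec_remove_redundant_patterns
  unfold remove_redundant_patterns remove_redundant_patterns_alt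
  simp only
  set ps := pvSorted3 patterns (fun x => -x.2) (fun x => -((PySem.Str.split₀ x.1).length : Int)) (fun x => x.1) with hps
  have hperm : ps.Perm patterns := pv_sorted3_perm patterns _ _ _
  have hsorteq : ∀ (l1 l2 : List (String × Int)), l1.Perm l2 →
      PySem.List.sorted2 l1 (fun x => x.2) (fun x => x.1) true
        = PySem.List.sorted2 l2 (fun x => x.2) (fun x => x.1) true := by
    intro l1 l2 h
    exact List.Perm.eq_of_pairwise
      (fun a b _ _ hab hba => pv_lt2_antisymm a b hab hba)
      (pv_sorted2_rev_pairwise _) (pv_sorted2_rev_pairwise _)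
      (((PySem.List.sorted2_perm _ _ _ _).trans h).trans (PySem.List.sorted2_perm _ _ _ _).symm)
  rcases hpre with hpre | hpre
  · -- pattern strings pairwise distinct: A's set is exactly the declaratively redundant strings
    have hnd : (ps.map Prod.fst).Nodup := ((hperm.map Prod.fst).nodup_iff).mpr hpre
    have hfe : ∀ p ∈ ps, (!(PySem.Set.contains ((PySem.List.enumerate ps).foldl (fun tr ip =>
        (PySem.List.enumerate ps).foldl (pvInnerA ip) tr) PySem.Set.empty) p.1))
        = (!(pvContained patterns p)) := by
      intro p hp
      rw [pv_char ps hnd p hp]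
      unfold pvContained
      rw [List.Perm.any_eq hperm]
    rw [List.filter_congr hfe]
    exact hsorteq _ _ (hperm.filter _)
  · -- counts pairwise distinct: neither side removes anything
    have hnd : (ps.map Prod.snd).Nodup := ((hperm.map Prod.snd).nodup_iff).mpr hpre
    rw [pv_foldl_outer_id ps hnd (PySem.List.enumerate ps) (fun x hx => hx) PySem.Set.empty]
    have hfa : ∀ p ∈ ps, (!(PySem.Set.contains PySem.Set.empty p.1)) = true := by
      intro p _
      rfl
    have hfb : ∀ p ∈ patterns, (!(pvContained patterns p)) = true := by
      intro p hp
      have : pvContained patterns p = false := by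
        rw [pvContained, List.any_eq_false]
        intro q hq
        have hnd' : (patterns.map Prod.snd).Nodup := hpre
        by_cases hc : p.2 = q.2
        · have : p = q := pv_snd_inj patterns hnd' p q hp hq hc
          subst this
          simp
        · simp [hc]
      rw [this]
      rfl
    rw [List.filter_congr hfa, List.filter_congr hfb, List.filter_true, List.filter_true]
    exact hsorteq _ _ hperm
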